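-- pv_equiv track=rewrite | github.com/chrishayuk/chuk-mcp-map | src/chuk_mcp_map/helpers.py | _order_fields
-- ===== SOURCE A (Python) =====
-- _PRIORITY_FIELDS: list[str] = [
--     "name",
--     "title",
--     "label",
--     "description",
--     "type",
--     "category",
--     "status",
-- ]
--
-- def _order_fields(keys: list[str]) -> list[str]:
--     """Reorder *keys* so priority fields appear first, preserving original order otherwise."""
--     key_set = {k.lower(): k for k in keys}
--     ordered: list[str] = []
--     seen: set[str] = set()
--
--     # Priority fields first
--     for pf in _PRIORITY_FIELDS:
--         if pf in key_set and key_set[pf] not in seen: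
--             ordered.append(key_set[pf])
--             seen.add(key_set[pf])
--
--     # Remaining fields in original order
--     for k in keys:
--         if k not in seen:
--             ordered.append(k)
--             seen.add(k)
--
--     return ordered
-- ===== SOURCE B (Python) =====
-- _PRIORITY_FIELDS: list[str] = [
--     "name",
--     "title",
--     "label",
--     "description",
--     "type",
--     "category",
--     "status",
-- ]
--
-- def _order_fields(keys: list[str]) -> list[str]:
--     """Priority fields first via one stable sort over the deduplicated keys."""
--     key_set = {k.lower(): k for k in keys}
--     rank = {key_set[pf]: i for i, pf in enumerate(_PRIORITY_FIELDS) if pf in key_set}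
--     unique = list(dict.fromkeys(keys))
--     return sorted(unique, key=lambda k: rank.get(k, len(_PRIORITY_FIELDS)))
-- ===== Notes on version B (the rewrite author's own statement) =====
-- stated objective: idiomatic
-- what changed: A's two explicit accumulate-and-skip scans over a mutable seen-set are replaced by building a rank table from the priority fields, deduplicating with dict.fromkeys, and doing one stable sort keyed by rank.
import Mathlib
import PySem

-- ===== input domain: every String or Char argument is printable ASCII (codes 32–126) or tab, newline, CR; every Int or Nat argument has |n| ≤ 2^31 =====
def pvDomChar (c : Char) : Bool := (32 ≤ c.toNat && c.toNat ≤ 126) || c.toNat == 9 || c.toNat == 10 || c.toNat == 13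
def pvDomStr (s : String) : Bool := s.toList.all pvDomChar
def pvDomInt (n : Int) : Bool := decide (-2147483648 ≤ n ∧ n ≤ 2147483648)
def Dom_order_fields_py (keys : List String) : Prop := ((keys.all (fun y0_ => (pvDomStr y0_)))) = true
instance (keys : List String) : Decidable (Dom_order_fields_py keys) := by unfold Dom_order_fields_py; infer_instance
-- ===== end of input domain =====

-- B replaces A's two explicit seen-set scans by a rank table plus one stable sort over the
-- deduplicated keys (objective: idiomatic; same result, proved equal below).

-- the module constant _PRIORITY_FIELDS (shared by both Python versions)
def pvPF : List String := ["name", "title", "label", "description", "type", "category", "status"]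

-- key_set = {k.lower(): k for k in keys}  (the identical first line of both Python versions)
def pvKeySet (keys : List String) : PySem.Dict String String :=
  keys.foldl (fun d k => d.insert (PySem.Str.lower k) k) PySem.Dict.empty

-- ===== PORT A =====
def order_fields_py (keys : List String) : List String :=
  let key_set := pvKeySet keys
  -- priority fields first
  let st1 := pvPF.foldl (fun (st : List String × PySem.Set String) pf =>
      if key_set.contains pf && !(st.2.contains (key_set.getD pf "")) then
        (st.1 ++ [key_set.getD pf ""], st.2.add (key_set.getD pf ""))
      else st) ([], PySem.Set.empty)
  -- remaining fields in original order
  let st2 := keys.foldl (fun (st : List String × PySem.Set String) k =>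
      if !(st.2.contains k) then (st.1 ++ [k], st.2.add k) else st) st1
  st2.1

-- ===== PORT B =====
def order_fields_py_alt (keys : List String) : List String :=
  let key_set := pvKeySet keys
  let rank : PySem.Dict String Int :=
    (PySem.List.enumerate pvPF 0).foldl (fun d p =>
      if key_set.contains p.2 then d.insert (key_set.getD p.2 "") p.1 else d)
      PySem.Dict.empty
  let unique := PySem.List.dedup keys
  PySem.List.sorted unique (fun k => rank.getD k (pvPF.length : Int)) false

-- ===== PRECONDITION & SPEC =====
def Spec_order_fields_py (keys : List String) (out : List String) : Prop := out = order_fields_py_alt keys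
instance (keys : List String) (out : List String) : Decidable (Spec_order_fields_py keys out) := by unfold Spec_order_fields_py; infer_instance

-- ===== CLAIM (what is proved, stated in full; the proofs are below) =====
def Claim_equal_order_fields_py : Prop := ∀ (keys : List String), Dom_order_fields_py keys → Spec_order_fields_py keys (order_fields_py keys)

-- ===== LEMMAS AND PROOFS =====

-- every entry (k, v) of key_set has k = v.lower() and v drawn from keys
theorem pvKeySet_fold_inv (keys : List String) (d0 : PySem.Dict String String)
    (pred : String → Prop)
    (h0 : ∀ k v, d0.get? k = some v → PySem.Str.lower v = k ∧ pred v)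
    (hk : ∀ x ∈ keys, pred x) :
    ∀ k v, (keys.foldl (fun d k => d.insert (PySem.Str.lower k) k) d0).get? k = some v →
      PySem.Str.lower v = k ∧ pred v := by
  induction keys generalizing d0 with
  | nil => exact h0
  | cons x xs ih =>
    intro k v hv
    refine ih (d0.insert (PySem.Str.lower x) x) ?_ (fun y hy => hk y (by simp [hy])) k v hv
    intro k' v' h'
    rw [PySem.Dict.get?_insert] at h'
    split at h'
    · rename_i heq
      cases h'
      exact ⟨heq.symm, hk x (by simp)⟩
    · exact h0 k' v' h'

theorem pvKeySet_inv (keys : List String) :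
    ∀ k v, (pvKeySet keys).get? k = some v → PySem.Str.lower v = k ∧ v ∈ keys := by
  refine pvKeySet_fold_inv keys PySem.Dict.empty (· ∈ keys) ?_ (fun x hx => hx)
  intro k v hv
  simp [PySem.Dict.empty, PySem.Dict.get?] at hv


theorem pvContains_false {α : Type} [BEq α] [LawfulBEq α] (s : PySem.Set α) (x : α)
    (h : x ∉ s) : PySem.Set.contains s x = false := by
  cases hc : PySem.Set.contains s x
  · rfl
  · exact absurd ((PySem.Set.contains_iff s x).mp hc) h

-- A's first loop collects exactly filterMap get? over the priority fields (state pair stays equal)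
theorem pvLoop1_eq (keys : List String) :
    ∀ (pfs : List String) (acc : List String), pfs.Nodup →
      (∀ x ∈ acc, PySem.Str.lower x ∉ pfs) →
      pfs.foldl (fun (st : List String × PySem.Set String) pf =>
        if (pvKeySet keys).contains pf && !(st.2.contains ((pvKeySet keys).getD pf "")) then
          (st.1 ++ [(pvKeySet keys).getD pf ""], st.2.add ((pvKeySet keys).getD pf ""))
        else st) (acc, acc)
      = (acc ++ pfs.filterMap (pvKeySet keys).get?, acc ++ pfs.filterMap (pvKeySet keys).get?) := by
  intro pfs
  induction pfs with
  | nil => intro acc _ _; simp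
  | cons pf pfs ih =>
    intro acc hnd hacc
    rcases List.nodup_cons.mp hnd with ⟨hpf, hnd'⟩
    rcases hget : (pvKeySet keys).get? pf with _ | v
    · -- pf not in key_set
      have hc : (pvKeySet keys).contains pf = false := by
        rw [PySem.Dict.contains_eq_isSome_get?, hget]; rfl
      simp only [List.foldl_cons]
      rw [if_neg ?hcnd1]
      case hcnd1 => rw [hc]; simp
      rw [List.filterMap_cons_none hget]
      exact ih acc hnd' (fun x hx hmem => hacc x hx (by simp [hmem]))
    · -- pf in key_set with value v; v cannot be in seen yet
      have hlow : PySem.Str.lower v = pf ∧ v ∈ keys := pvKeySet_inv keys pf v hget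
      have hc : (pvKeySet keys).contains pf = true := by
        rw [PySem.Dict.contains_eq_isSome_get?, hget]; rfl
      have hgd : (pvKeySet keys).getD pf "" = v := by
        rw [PySem.Dict.getD_eq_get?_getD, hget]; rfl
      have hvacc : v ∉ acc := fun hmem => hacc v hmem (by rw [hlow.1]; simp)
      have hcont : PySem.Set.contains acc v = false := pvContains_false acc v hvacc
      have hadd : PySem.Set.add acc v = acc ++ [v] := by
        unfold PySem.Set.add; rw [hcont]; simp
      simp only [List.foldl_cons, hgd]
      rw [if_pos ?hcnd2]
      case hcnd2 => rw [hc, hcont]; rfl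
      rw [hadd, List.filterMap_cons_some hget]
      have hinv' : ∀ x ∈ acc ++ [v], PySem.Str.lower x ∉ pfs := by
        intro x hx
        rcases List.mem_append.mp hx with h | h
        · exact fun hm => hacc x h (by simp [hm])
        · simp only [List.mem_singleton] at h
          subst h
          rw [hlow.1]
          exact hpf
      rw [ih (acc ++ [v]) hnd' hinv']
      simp

-- A's second loop, run from the lockstep state (s, s), appends the not-yet-seen keys in
-- first-occurrence order: the result is Q ++ filter over the ordered dedup of keys
theorem pvLoop2_eq (Q : List String) :
    ∀ (xs s t : List String),
      (∀ a, a ∈ s ↔ a ∈ Q ∨ a ∈ t) →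
      s = Q ++ t.filter (fun a => !Q.contains a) →
      (xs.foldl (fun (st : List String × PySem.Set String) k =>
        if !(st.2.contains k) then (st.1 ++ [k], st.2.add k) else st) (s, s)).1
      = Q ++ (PySem.Set.update t xs).filter (fun a => !Q.contains a) := by
  intro xs
  induction xs with
  | nil => intro s t hmem hs; simpa [PySem.Set.update] using hs
  | cons x xs ih =>
    intro s t hmem hs
    have hupd : PySem.Set.update t (x :: xs) = PySem.Set.update (PySem.Set.add t x) xs := by
      simp [PySem.Set.update]
    by_cases hx : x ∈ s
    · have hc : PySem.Set.contains s x = true := (PySem.Set.contains_iff s x).mpr hx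
      simp only [List.foldl_cons]
      rw [if_neg ?hcnd1]
      case hcnd1 => rw [hc]; simp
      rw [hupd]
      refine ih s (PySem.Set.add t x) ?_ ?_
      · intro a
        rw [PySem.Set.mem_add]
        constructor
        · intro ha
          rcases (hmem a).mp ha with h | h
          · exact Or.inl h
          · exact Or.inr (Or.inl h)
        · rintro (h | h | h)
          · exact (hmem a).mpr (Or.inl h)
          · exact (hmem a).mpr (Or.inr h)
          · subst h; exact hx
      · by_cases hxt : x ∈ t
        · have hct : PySem.Set.contains t x = true := (PySem.Set.contains_iff t x).mpr hxt
          have hadd : PySem.Set.add t x = t := by unfold PySem.Set.add; rw [hct]; simp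
          rw [hadd]; exact hs
        · have hxq : x ∈ Q := by
            rcases (hmem x).mp hx with h | h
            · exact h
            · exact absurd h hxt
          have hct : PySem.Set.contains t x = false := pvContains_false t x hxt
          have hadd : PySem.Set.add t x = t ++ [x] := by unfold PySem.Set.add; rw [hct]; simp
          rw [hadd, List.filter_append]
          have hfx : List.filter (fun a => !Q.contains a) [x] = [] := by
            simp [List.filter, hxq]
          rw [hfx, List.append_nil]
          exact hs
    · have hc : PySem.Set.contains s x = false := pvContains_false s x hx
      have hxq : x ∉ Q := fun h => hx ((hmem x).mpr (Or.inl h))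
      have hxt : x ∉ t := fun h => hx ((hmem x).mpr (Or.inr h))
      have hct : PySem.Set.contains t x = false := pvContains_false t x hxt
      have hadds : PySem.Set.add s x = s ++ [x] := by unfold PySem.Set.add; rw [hc]; simp
      have haddt : PySem.Set.add t x = t ++ [x] := by unfold PySem.Set.add; rw [hct]; simp
      simp only [List.foldl_cons]
      rw [if_pos ?hcnd2]
      case hcnd2 => rw [hc]; rfl
      rw [hadds, hupd, haddt]
      refine ih (s ++ [x]) (t ++ [x]) ?_ ?_
      · intro a
        simp only [List.mem_append, List.mem_singleton]
        constructor
        · rintro (h | h)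
          · rcases (hmem a).mp h with h' | h'
            · exact Or.inl h'
            · exact Or.inr (Or.inl h')
          · exact Or.inr (Or.inr h)
        · rintro (h | h | h)
          · exact Or.inl ((hmem a).mpr (Or.inl h))
          · exact Or.inl ((hmem a).mpr (Or.inr h))
          · exact Or.inr h
      · rw [List.filter_append]
        have hfx : List.filter (fun a => !Q.contains a) [x] = [x] := by
          simp [List.filter, hxq]
        rw [hfx, ← List.append_assoc, ← hs]

-- ---- stable insertion sort: bucket characterization ----

theorem pvInsertBy_cons (before : α → α → Bool) (x y : α) (ys : List α) :
    PySem.List.insertBy before x (y :: ys)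
      = if before x y then x :: y :: ys else y :: PySem.List.insertBy before x ys := rfl

theorem pvInsertBy_append (before : α → α → Bool) (x : α) :
    ∀ (p q : List α), (∀ y ∈ p, before x y = false) →
      PySem.List.insertBy before x (p ++ q) = p ++ PySem.List.insertBy before x q := by
  intro p
  induction p with
  | nil => intro q _; simp
  | cons y p ih =>
    intro q h
    have hy : before x y = false := h y (by simp)
    rw [List.cons_append, pvInsertBy_cons, hy]
    simp only [Bool.false_eq_true, if_false]
    rw [ih q (fun z hz => h z (by simp [hz]))]
    simp

theorem pvInsertBy_front (before : α → α → Bool) (x : α) :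
    ∀ (l : List α), (∀ y ∈ l, before x y = true) →
      PySem.List.insertBy before x l = x :: l := by
  intro l h
  cases l with
  | nil => rfl
  | cons y ys =>
    rw [pvInsertBy_cons, h y (by simp)]
    simp

theorem pvSorted_snoc {κ : Type} [LT κ] [DecidableLT κ] (xs : List α) (x : α) (key : α → κ) :
    PySem.List.sorted (xs ++ [x]) key = PySem.List.insertBy (fun a b => decide (key a < key b)) x (PySem.List.sorted xs key) := by
  rw [PySem.List.sorted_eq_foldl_insertBy, PySem.List.sorted_eq_foldl_insertBy, List.foldl_append]
  rfl

theorem pvSorted_min_split (key : α → Int) (v : Int) :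
    ∀ (xs : List α), (∀ x ∈ xs, v ≤ key x) →
      PySem.List.sorted xs key = xs.filter (fun x => key x == v) ++
        PySem.List.sorted (xs.filter (fun x => !(key x == v))) key := by
  intro xs
  induction xs using List.reverseRecOn with
  | nil => simp
  | append_singleton xs x ih =>
    intro hmin
    have hxs : ∀ y ∈ xs, v ≤ key y := fun y hy => hmin y (by simp [hy])
    have hx : v ≤ key x := hmin x (by simp)
    rw [pvSorted_snoc, ih hxs, List.filter_append, List.filter_append]
    by_cases hkv : key x = v
    · have h1 : List.filter (fun x => key x == v) [x] = [x] := by simp [hkv]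
      have h2 : List.filter (fun x => !(key x == v)) [x] = [] := by simp [hkv]
      rw [h1, h2, List.append_nil]
      rw [pvInsertBy_append _ x _ _ ?hp]
      case hp =>
        intro y hy
        have : key y = v := by
          have := List.of_mem_filter hy
          simpa using this
        simp [hkv, this]
      rw [pvInsertBy_front _ x _ ?hf]
      case hf =>
        intro y hy
        rw [PySem.List.mem_sorted] at hy
        have h1 := List.of_mem_filter hy
        have h2 : v ≤ key y := hxs y (List.mem_of_mem_filter hy)
        simp only [bne_iff_ne, ne_eq, Bool.not_eq_eq_eq_not, Bool.not_true, beq_eq_false_iff_ne] at h1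
        simp only [decide_eq_true_eq, hkv]
        omega
      simp
    · have h1 : List.filter (fun x => key x == v) [x] = [] := by simp [hkv]
      have h2 : List.filter (fun x => !(key x == v)) [x] = [x] := by simp [hkv]
      rw [h1, h2, List.append_nil]
      rw [pvInsertBy_append _ x _ _ ?hp]
      case hp =>
        intro y hy
        have : key y = v := by
          have := List.of_mem_filter hy
          simpa using this
        simp only [decide_eq_false_iff_not, this]
        omega
      rw [← pvSorted_snoc]

theorem pvFlatMap_congr (l : List β) (f g : β → List α) (h : ∀ b ∈ l, f b = g b) :
    l.flatMap f = l.flatMap g := by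
  induction l with
  | nil => rfl
  | cons b l ih =>
    simp only [List.flatMap_cons, h b (by simp)]
    rw [ih (fun b' hb' => h b' (by simp [hb']))]

theorem pvSorted_buckets (key : α → Int) :
    ∀ (vs : List Int) (xs : List α), vs.Pairwise (· < ·) → (∀ x ∈ xs, key x ∈ vs) →
      PySem.List.sorted xs key = vs.flatMap (fun v => xs.filter (fun x => key x == v)) := by
  intro vs
  induction vs with
  | nil =>
    intro xs _ hall
    cases xs with
    | nil => rfl
    | cons x xs => exact absurd (hall x (by simp)) (by simp)
  | cons v vs ih =>
    intro xs hp hall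
    rcases List.pairwise_cons.mp hp with ⟨hv, hp'⟩
    have hmin : ∀ x ∈ xs, v ≤ key x := by
      intro x hx
      rcases List.mem_cons.mp (hall x hx) with h | h
      · omega
      · exact le_of_lt (hv _ h)
    rw [pvSorted_min_split key v xs hmin, List.flatMap_cons]
    congr 1
    rw [ih (xs.filter (fun x => !(key x == v))) hp' ?hall']
    case hall' =>
      intro x hx
      have h1 := List.of_mem_filter hx
      have h2 := hall x (List.mem_of_mem_filter hx)
      simp only [Bool.not_eq_eq_eq_not, Bool.not_true, beq_eq_false_iff_ne, ne_eq] at h1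
      rcases List.mem_cons.mp h2 with h | h
      · exact absurd h h1
      · exact h
    refine pvFlatMap_congr _ _ _ ?_
    intro w hw
    rw [List.filter_filter]
    refine List.filter_congr ?_
    intro x _
    by_cases hxw : key x = w
    · have hwv : w ≠ v := by have := hv w hw; omega
      simp [hxw, hwv]
    · simp [hxw]

-- ---- the rank dict of B ----

theorem pvRank_get? (keys : List String) :
    ∀ (pfs : List String) (s : Int) (acc : PySem.Dict String Int), pfs.Nodup →
      ∀ x, ((PySem.List.enumerate pfs s).foldl (fun d p =>
          if (pvKeySet keys).contains p.2 then d.insert ((pvKeySet keys).getD p.2 "") p.1 else d)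
          acc).get? x
        = if (pvKeySet keys).get? (PySem.Str.lower x) = some x ∧ PySem.Str.lower x ∈ pfs
          then some (s + (pfs.idxOf (PySem.Str.lower x) : Int)) else acc.get? x := by
  intro pfs
  induction pfs with
  | nil => intro s acc _ x; simp [PySem.List.enumerate]
  | cons pf pfs ih =>
    intro s acc hnd x
    rcases List.nodup_cons.mp hnd with ⟨hpf, hnd'⟩
    rw [PySem.List.enumerate_cons, List.foldl_cons]
    rw [ih (s + 1) _ hnd' x]
    have hacc' : (if (pvKeySet keys).contains (s, pf).2 = true
        then acc.insert ((pvKeySet keys).getD (s, pf).2 "") (s, pf).1 else acc).get? x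
      = if (pvKeySet keys).get? pf = some x then some s else acc.get? x := by
      rcases hget : (pvKeySet keys).get? pf with _ | w
      · have hc : (pvKeySet keys).contains pf = false := by
          rw [PySem.Dict.contains_eq_isSome_get?, hget]; rfl
        have h1 : (if (pvKeySet keys).contains (s, pf).2 = true
            then acc.insert ((pvKeySet keys).getD (s, pf).2 "") (s, pf).1 else acc) = acc := by
          show (if (pvKeySet keys).contains pf = true then _ else acc) = acc
          rw [hc]; simp
        rw [h1]
        simp
      · have hc : (pvKeySet keys).contains pf = true := by
          rw [PySem.Dict.contains_eq_isSome_get?, hget]; rfl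
        have hgd : (pvKeySet keys).getD pf "" = w := by
          rw [PySem.Dict.getD_eq_get?_getD, hget]; rfl
        have h1 : (if (pvKeySet keys).contains (s, pf).2 = true
            then acc.insert ((pvKeySet keys).getD (s, pf).2 "") (s, pf).1 else acc)
            = acc.insert w s := by
          show (if (pvKeySet keys).contains pf = true
            then acc.insert ((pvKeySet keys).getD pf "") s else acc) = acc.insert w s
          rw [hc, if_pos rfl, hgd]
        rw [h1, PySem.Dict.get?_insert]
        by_cases hxw : x = w
        · subst hxw
          rw [if_pos rfl]
          simp
        · rw [if_neg hxw, if_neg (show ¬ (some w = some x) from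
            fun hcc => hxw (Option.some.inj hcc).symm)]
    by_cases hx : (pvKeySet keys).get? (PySem.Str.lower x) = some x
    · by_cases hmem : PySem.Str.lower x ∈ pfs
      · have hne : PySem.Str.lower x ≠ pf := fun h => hpf (h ▸ hmem)
        rw [if_pos ⟨hx, hmem⟩, if_pos ⟨hx, List.mem_cons_of_mem _ hmem⟩]
        rw [List.idxOf_cons_ne _ (by simpa using hne.symm)]
        congr 1
        push_cast
        ring
      · by_cases hhd : PySem.Str.lower x = pf
        · rw [if_neg (show ¬ ((pvKeySet keys).get? (PySem.Str.lower x) = some x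
              ∧ PySem.Str.lower x ∈ pfs) from fun h => hmem h.2)]
          rw [hacc', if_pos (show (pvKeySet keys).get? pf = some x from hhd ▸ hx)]
          rw [if_pos ⟨hx, by rw [hhd]; exact List.mem_cons_self⟩]
          rw [hhd, List.idxOf_cons_self]
          norm_num
        · have hne2 : ¬ ((pvKeySet keys).get? pf = some x) :=
            fun hcc => hhd ((pvKeySet_inv keys pf x hcc).1)
          rw [if_neg (show ¬ ((pvKeySet keys).get? (PySem.Str.lower x) = some x
              ∧ PySem.Str.lower x ∈ pfs) from fun h => hmem h.2)]
          rw [hacc', if_neg hne2]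
          rw [if_neg (show ¬ ((pvKeySet keys).get? (PySem.Str.lower x) = some x
              ∧ PySem.Str.lower x ∈ pf :: pfs) from fun h =>
                (List.mem_cons.mp h.2).elim hhd hmem)]
    · have hne2 : ¬ ((pvKeySet keys).get? pf = some x) := by
        intro hcc
        rw [← (pvKeySet_inv keys pf x hcc).1] at hcc
        exact hx hcc
      rw [if_neg (show ¬ ((pvKeySet keys).get? (PySem.Str.lower x) = some x
          ∧ PySem.Str.lower x ∈ pfs) from fun h => hx h.1)]
      rw [hacc', if_neg hne2]
      rw [if_neg (show ¬ ((pvKeySet keys).get? (PySem.Str.lower x) = some x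
          ∧ PySem.Str.lower x ∈ pf :: pfs) from fun h => hx h.1)]

-- small list facts
theorem pvFilter_beq_nil {α : Type} [DecidableEq α] (v : α) :
    ∀ (l : List α), v ∉ l → l.filter (fun x => x == v) = [] := by
  intro l hv
  rw [List.filter_eq_nil_iff]
  intro a ha
  simp only [beq_iff_eq]
  intro h; subst h; exact hv ha

theorem pvFilter_beq_singleton {α : Type} [DecidableEq α] (v : α) :
    ∀ (l : List α), l.Nodup → v ∈ l → l.filter (fun x => x == v) = [v] := by
  intro l
  induction l with
  | nil => intro _ h; simp at h
  | cons y l ih =>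
    intro hnd hv
    rcases List.nodup_cons.mp hnd with ⟨hy, hnd'⟩
    by_cases hyv : y = v
    · subst hyv
      simp [List.filter_cons, pvFilter_beq_nil y l hy]
    · have hvl : v ∈ l := by
        rcases List.mem_cons.mp hv with h | h
        · exact absurd h.symm hyv
        · exact h
      have hby : (y == v) = false := by simp [hyv]
      simp only [List.filter_cons, hby, Bool.false_eq_true, if_false]
      exact ih hnd' hvl

theorem pvFilterMap_eq_flatMap (f : β → Option α) :
    ∀ (l : List β), l.filterMap f = l.flatMap (fun b => (f b).toList) := by
  intro l
  induction l with
  | nil => rfl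
  | cons b l ih =>
    cases h : f b <;> simp [List.filterMap_cons, h, ih]

-- ---- main theorem ----

-- the list of priority picks, and B's sort key, as closed forms used by the proofs
def pvQ (keys : List String) : List String := pvPF.filterMap (pvKeySet keys).get?

def pvKey (keys : List String) (x : String) : Int :=
  if (pvKeySet keys).get? (PySem.Str.lower x) = some x ∧ PySem.Str.lower x ∈ pvPF
  then (pvPF.idxOf (PySem.Str.lower x) : Int) else 7

theorem pvQ_mem (keys : List String) (x : String) :
    x ∈ pvQ keys ↔ ((pvKeySet keys).get? (PySem.Str.lower x) = some x ∧ PySem.Str.lower x ∈ pvPF) := by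
  unfold pvQ
  rw [List.mem_filterMap]
  constructor
  · rintro ⟨pf, hpf, hget⟩
    have hl := (pvKeySet_inv keys pf x hget).1
    subst hl
    exact ⟨hget, hpf⟩
  · rintro ⟨hget, hmem⟩
    exact ⟨PySem.Str.lower x, hmem, hget⟩

theorem pvA_eq (keys : List String) :
    order_fields_py keys
      = pvQ keys ++ (PySem.Set.ofList keys).filter (fun a => !((pvQ keys).contains a)) := by
  show (keys.foldl (fun (st : List String × PySem.Set String) k =>
      if !(st.2.contains k) then (st.1 ++ [k], st.2.add k) else st)
      (pvPF.foldl (fun (st : List String × PySem.Set String) pf =>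
        if (pvKeySet keys).contains pf && !(st.2.contains ((pvKeySet keys).getD pf "")) then
          (st.1 ++ [(pvKeySet keys).getD pf ""], st.2.add ((pvKeySet keys).getD pf ""))
        else st) (([] : List String), ([] : List String)))).1 = _
  rw [pvLoop1_eq keys pvPF [] (by decide) (by simp)]
  simp only [List.nil_append]
  rw [← PySem.Set.update_nil_left keys]
  exact pvLoop2_eq (pvQ keys) keys (pvQ keys) [] (fun a => by simp) (by simp)

theorem pvRank_getD (keys : List String) (x : String) :
    ((PySem.List.enumerate pvPF 0).foldl (fun d p =>
        if (pvKeySet keys).contains p.2 then d.insert ((pvKeySet keys).getD p.2 "") p.1 else d)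
        PySem.Dict.empty).getD x (pvPF.length : Int) = pvKey keys x := by
  rw [PySem.Dict.getD_eq_get?_getD, pvRank_get? keys pvPF 0 PySem.Dict.empty (by decide) x]
  unfold pvKey
  by_cases hcond : (pvKeySet keys).get? (PySem.Str.lower x) = some x ∧ PySem.Str.lower x ∈ pvPF
  · rw [if_pos hcond, if_pos hcond]
    norm_num
  · rw [if_neg hcond, if_neg hcond]
    simp [PySem.Dict.empty, PySem.Dict.get?, pvPF]

theorem pvB_eq (keys : List String) :
    order_fields_py_alt keys
      = ([0, 1, 2, 3, 4, 5, 6, 7] : List Int).flatMap (fun v =>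
          (PySem.List.dedup keys).filter (fun x => pvKey keys x == v)) := by
  show PySem.List.sorted (PySem.List.dedup keys)
      (fun k => ((PySem.List.enumerate pvPF 0).foldl (fun d p =>
        if (pvKeySet keys).contains p.2 then d.insert ((pvKeySet keys).getD p.2 "") p.1 else d)
        PySem.Dict.empty).getD k (pvPF.length : Int)) = _
  rw [funext (pvRank_getD keys)]
  refine pvSorted_buckets (pvKey keys) [0, 1, 2, 3, 4, 5, 6, 7] (PySem.List.dedup keys) (by decide) ?_
  intro x _
  unfold pvKey
  split
  · rename_i h
    have hlt : pvPF.idxOf (PySem.Str.lower x) < pvPF.length := List.idxOf_lt_length_of_mem h.2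
    have h7 : pvPF.length = 7 := by decide
    rw [h7] at hlt
    simp only [List.mem_cons, List.not_mem_nil, or_false]
    omega
  · simp

theorem pvBucket_eq (keys : List String) (j : Nat) (hj : j < 7) (v : Int) (hv : (j : Int) = v) :
    (PySem.List.dedup keys).filter (fun x => pvKey keys x == v)
      = ((pvKeySet keys).get? (pvPF[j]'(by simp [pvPF]; omega))).toList := by
  subst hv
  have h7 : pvPF.length = 7 := by decide
  have hPFnd : pvPF.Nodup := by decide
  have hjl : j < pvPF.length := by omega
  rcases hg : (pvKeySet keys).get? (pvPF[j]'hjl) with _ | w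
  · -- no key at priority field j: the bucket is empty
    simp only [Option.toList]
    refine List.filter_eq_nil_iff.mpr ?_
    intro x _
    simp only [beq_iff_eq]
    intro hcontra
    unfold pvKey at hcontra
    split at hcontra
    · rename_i h
      have hidx : pvPF.idxOf (PySem.Str.lower x) = j := by exact_mod_cast hcontra
      have hlt : pvPF.idxOf (PySem.Str.lower x) < pvPF.length := List.idxOf_lt_length_of_mem h.2
      have hget : pvPF[j]'hjl = PySem.Str.lower x := by
        have := List.getElem_idxOf (x := PySem.Str.lower x) (xs := pvPF) hlt
        simpa [hidx] using this
      rw [hget, h.1] at hg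
      simp at hg
    · omega
  · -- the value w picked for priority field j: the bucket is [w]
    have hvl : PySem.Str.lower w = pvPF[j]'hjl := (pvKeySet_inv keys _ w hg).1
    have hvk : w ∈ keys := (pvKeySet_inv keys _ w hg).2
    have hpw : ∀ x, (pvKey keys x == (j : Int)) = (x == w) := by
      intro x
      unfold pvKey
      by_cases hxw : x = w
      · subst hxw
        have hmem : PySem.Str.lower x ∈ pvPF := by rw [hvl]; exact List.getElem_mem hjl
        have hgx : (pvKeySet keys).get? (PySem.Str.lower x) = some x := by rw [hvl]; exact hg
        rw [if_pos ⟨hgx, hmem⟩]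
        have hidx : pvPF.idxOf (PySem.Str.lower x) = j := by
          rw [hvl]
          exact hPFnd.idxOf_getElem j hjl
        simp [hidx]
      · have hne : ¬ ((if (pvKeySet keys).get? (PySem.Str.lower x) = some x ∧ PySem.Str.lower x ∈ pvPF
            then ((pvPF.idxOf (PySem.Str.lower x) : Nat) : Int) else 7) = (j : Int)) := by
          split
          · rename_i h
            intro hcontra
            have hidx : pvPF.idxOf (PySem.Str.lower x) = j := by exact_mod_cast hcontra
            have hlt : pvPF.idxOf (PySem.Str.lower x) < pvPF.length := List.idxOf_lt_length_of_mem h.2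
            have hget : pvPF[j]'hjl = PySem.Str.lower x := by
              have := List.getElem_idxOf (x := PySem.Str.lower x) (xs := pvPF) hlt
              simpa [hidx] using this
            rw [hget, h.1] at hg
            exact hxw (Option.some.inj hg)
          · omega
        rw [beq_eq_false_iff_ne.mpr hne, beq_eq_false_iff_ne.mpr hxw]
    rw [List.filter_congr (fun x _ => hpw x)]
    simp only [Option.toList]
    exact pvFilter_beq_singleton w (PySem.List.dedup keys) (PySem.List.nodup_dedup keys)
      ((PySem.List.mem_dedup (xs := keys) (x := w)).mpr hvk)

theorem pvBucket7_eq (keys : List String) :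
    (PySem.List.dedup keys).filter (fun x => pvKey keys x == (7 : Int))
      = (PySem.List.dedup keys).filter (fun a => !((pvQ keys).contains a)) := by
  refine List.filter_congr ?_
  intro x _
  by_cases hq : x ∈ pvQ keys
  · have h := (pvQ_mem keys x).mp hq
    have hlt : pvPF.idxOf (PySem.Str.lower x) < pvPF.length := List.idxOf_lt_length_of_mem h.2
    have h7 : pvPF.length = 7 := by decide
    have hkx : pvKey keys x = (pvPF.idxOf (PySem.Str.lower x) : Int) := by
      unfold pvKey; rw [if_pos h]
    have hne : ¬ (pvKey keys x = 7) := by rw [hkx]; omega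
    simp [hne, hq]
  · have hcond : ¬ ((pvKeySet keys).get? (PySem.Str.lower x) = some x ∧ PySem.Str.lower x ∈ pvPF) :=
      fun h => hq ((pvQ_mem keys x).mpr h)
    have hkx : pvKey keys x = 7 := by unfold pvKey; rw [if_neg hcond]
    simp [hkx, hq]

theorem pvQ_concat (keys : List String) :
    pvQ keys = ((pvKeySet keys).get? "name").toList ++ ((pvKeySet keys).get? "title").toList
      ++ ((pvKeySet keys).get? "label").toList ++ ((pvKeySet keys).get? "description").toList
      ++ ((pvKeySet keys).get? "type").toList ++ ((pvKeySet keys).get? "category").toList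
      ++ ((pvKeySet keys).get? "status").toList := by
  unfold pvQ
  rw [pvFilterMap_eq_flatMap]
  simp [pvPF]

theorem pvMain (keys : List String) : order_fields_py keys = order_fields_py_alt keys := by
  rw [pvA_eq keys, pvB_eq keys]
  simp only [List.flatMap_cons, List.flatMap_nil, List.append_nil]
  rw [pvBucket_eq keys 0 (by omega) 0 (by norm_num), pvBucket_eq keys 1 (by omega) 1 (by norm_num),
      pvBucket_eq keys 2 (by omega) 2 (by norm_num), pvBucket_eq keys 3 (by omega) 3 (by norm_num),
      pvBucket_eq keys 4 (by omega) 4 (by norm_num), pvBucket_eq keys 5 (by omega) 5 (by norm_num),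
      pvBucket_eq keys 6 (by omega) 6 (by norm_num), pvBucket7_eq keys]
  rw [PySem.List.dedup_eq_ofList]
  rw [pvQ_concat keys]
  simp [pvPF, List.append_assoc]

-- ===== VERDICT (by name: the statement is the Claim_ definition above) =====
theorem order_fields_py_spec : Claim_equal_order_fields_py := by
  intro keys _
  unfold Spec_order_fields_py
  exact pvMain keys
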